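-- pv_equiv track=rewrite | github.com/arminmirrezai/CSBA_paper | Code_CSBA.py | q_gram
-- ===== SOURCE A (Python) =====
-- def shingles(k, string):
--     """
--     shingles converts a string into a k-shingle
--
--     :param k: length of substrings
--     :param string: string that is being shingled
--     :return: k-shingle of a string
--     """
--     # initialize dictionary for shingles
--     shingles = dict()
--
--     # loop over string
--     for i in range(len(string) - k + 1):
--
--         # create shingle
--         shingle = string[i:i + k]
--
--         # check the num of occurances of shingle
--         count = shingles.get(shingle)
--
--         # update the num of occurances of shingle
--         if count:
--             shingles[str(shingle)] = int(count + 1)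
--         else:
--             shingles[str(shingle)] = 1
--
--     return shingles
--
-- def q_gram(str_a, str_b):
--     """
--     q_gram calculates the q-gram distance between two strings
--
--     :param str_a: first string to be compared
--     :param str_b: second string to be compared
--     :return: q-gram distance of two string
--     """
--     # convert strings in to shingles
--     shingles_a = shingles(3, str_a)
--     shingles_b = shingles(3, str_b)
--
--     # create union of all shingles in both strings
--     union = set()
--     for shingle in shingles_a.keys():
--         union.add(shingle)
--     for shingle in shingles_b.keys():
--         union.add(shingle)
--
--     # initialize distance
--     distance = 0
--     for shingle in union:
--
--         # compare occurance of shingle in string a and b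
--         count_a, count_b = 0, 0
--         if shingles_a.get(shingle) is not None:
--             count_a = int(shingles_a.get(shingle))
--         if shingles_b.get(shingle) is not None:
--             count_b = int(shingles_b.get(shingle))
--
--         # apply manhatten distance
--         distance += abs(count_a - count_b)
--
--     return distance
-- ===== SOURCE B (Python) =====
-- def q_gram(str_a, str_b):
--     """q-gram (3-shingle) distance via counts: total_a + total_b - 2*overlap."""
--     counts_a = {}
--     for i in range(len(str_a) - 2):
--         g = str_a[i:i + 3]
--         counts_a[g] = counts_a.get(g, 0) + 1
--     counts_b = {}
--     for i in range(len(str_b) - 2):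
--         g = str_b[i:i + 3]
--         counts_b[g] = counts_b.get(g, 0) + 1
--     overlap = sum(min(c, counts_b[g]) for g, c in counts_a.items() if g in counts_b)
--     total_a = sum(counts_a.values())
--     total_b = sum(counts_b.values())
--     return total_a + total_b - 2 * overlap
-- ===== Notes on version B (the rewrite author's own statement) =====
-- stated objective: alternative
-- what changed: Replaces the union-set build plus per-shingle abs loop with count maps, totals from summed counts, and a single intersection pass summing min(count_a,count_b), returning total_a + total_b - 2*overlap.
import Mathlib
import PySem

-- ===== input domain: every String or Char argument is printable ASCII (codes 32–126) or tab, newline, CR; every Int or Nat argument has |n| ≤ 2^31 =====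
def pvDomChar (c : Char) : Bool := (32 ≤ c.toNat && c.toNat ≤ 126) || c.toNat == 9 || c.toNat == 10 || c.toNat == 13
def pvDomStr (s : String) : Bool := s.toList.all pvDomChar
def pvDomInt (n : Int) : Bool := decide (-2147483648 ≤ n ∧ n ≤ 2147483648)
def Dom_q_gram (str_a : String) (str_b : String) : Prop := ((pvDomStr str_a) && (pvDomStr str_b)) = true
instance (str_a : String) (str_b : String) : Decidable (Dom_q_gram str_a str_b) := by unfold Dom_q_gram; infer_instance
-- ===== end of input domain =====

-- B replaces A's union-set + per-shingle abs loop by count maps and the identity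
-- |a-b| = a+b-2*min(a,b): totals plus one intersection pass (objective: alternative).


-- ===== PORT A =====
-- shingles(k, string): dict of k-shingle -> occurrence count, with Python truthiness on the stored count
def pyShingles (k : Int) (s : String) : PySem.Dict String Int :=
  (PySem.List.pyRange 0 (PySem.Str.len s - k + 1) 1).foldl
    (fun d i =>
      let sh := PySem.Str.slice s (some i) (some (i + k))
      match d.get? sh with
      | some c => if c ≠ 0 then d.insert sh (c + 1) else d.insert sh 1
      | none => d.insert sh 1)
    PySem.Dict.empty

def q_gram (str_a : String) (str_b : String) : Int :=
  let shingles_a := pyShingles 3 str_a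
  let shingles_b := pyShingles 3 str_b
  let union : PySem.Set String :=
    shingles_b.keys.foldl (fun u sh => PySem.Set.add u sh)
      (shingles_a.keys.foldl (fun u sh => PySem.Set.add u sh) PySem.Set.empty)
  union.foldl
    (fun dist sh =>
      let count_a : Int := match shingles_a.get? sh with | some v => v | none => 0
      let count_b : Int := match shingles_b.get? sh with | some v => v | none => 0
      dist + |count_a - count_b|) 0

-- ===== PORT B =====
-- 3-gram count map (counts[g] = counts.get(g, 0) + 1)
def counts3 (s : String) : PySem.Dict String Int :=
  (PySem.List.pyRange 0 (PySem.Str.len s - 2) 1).foldl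
    (fun d i =>
      let g := PySem.Str.slice s (some i) (some (i + 3))
      d.insert g (d.getD g 0 + 1))
    PySem.Dict.empty

def q_gram_alt (str_a : String) (str_b : String) : Int :=
  let counts_a := counts3 str_a
  let counts_b := counts3 str_b
  let overlap : Int :=
    ((counts_a.items.filter (fun gv => counts_b.contains gv.1)).map
      (fun gv => min gv.2 (counts_b.getD gv.1 0))).sum
  let total_a : Int := counts_a.values.sum
  let total_b : Int := counts_b.values.sum
  total_a + total_b - 2 * overlap

-- ===== PRECONDITION & SPEC =====
def Spec_q_gram (str_a : String) (str_b : String) (out : Int) : Prop := out = q_gram_alt str_a str_b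
instance (str_a : String) (str_b : String) (out : Int) : Decidable (Spec_q_gram str_a str_b out) := by unfold Spec_q_gram; infer_instance

-- ===== CLAIM (what is proved, stated in full; the proofs are below) =====
def Claim_equal_q_gram : Prop := ∀ (str_a : String) (str_b : String), Dom_q_gram str_a str_b → Spec_q_gram str_a str_b (q_gram str_a str_b)

-- ===== LEMMAS AND PROOFS =====

-- the list of 3-grams of s (in order, with multiplicity)
def grams (s : String) : List String :=
  (PySem.List.pyRange 0 (PySem.Str.len s - 2) 1).map
    (fun i => PySem.Str.slice s (some i) (some (i + 3)))

-- A's truthiness branch ('if count:') behaves as get(g,0)+1 once all stored counts are positive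
theorem afold_eq (l : List String) (d : PySem.Dict String Int)
    (h : ∀ k v, d.get? k = some v → 0 < v) :
    l.foldl (fun d sh =>
      match d.get? sh with
      | some c => if c ≠ 0 then d.insert sh (c + 1) else d.insert sh 1
      | none => d.insert sh 1) d
    = l.foldl (fun d sh => d.insert sh (d.getD sh 0 + 1)) d := by
  induction l generalizing d with
  | nil => rfl
  | cons x t ih =>
    have hpos : 0 ≤ d.getD x 0 := by
      rw [PySem.Dict.getD_eq_get?_getD]
      cases hg : d.get? x with
      | none => simp
      | some c => have := h x c hg; simpa using le_of_lt this
    simp only [List.foldl_cons]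
    have hstep : (match d.get? x with
      | some c => if c ≠ 0 then d.insert x (c + 1) else d.insert x 1
      | none => d.insert x 1) = d.insert x (d.getD x 0 + 1) := by
      rw [PySem.Dict.getD_eq_get?_getD]
      cases hg : d.get? x with
      | none => simp
      | some c => have := h x c hg; simp; exact fun h0 => absurd h0 (by omega)
    rw [hstep]
    apply ih
    intro k v hkv
    rw [PySem.Dict.get?_insert] at hkv
    split_ifs at hkv with he
    · cases hkv; omega
    · exact h k v hkv

theorem counts3_eq_counter (s : String) :
    counts3 s = PySem.Dict.counter (grams s) := by
  rw [← PySem.Dict.foldl_insert_getD_add_one_eq_counter, grams, List.foldl_map]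
  rfl

theorem pyShingles_eq_counter (s : String) :
    pyShingles 3 s = PySem.Dict.counter (grams s) := by
  have h0 : ∀ k v, (PySem.Dict.empty : PySem.Dict String Int).get? k = some v → 0 < v := by
    intro k v hkv; rw [PySem.Dict.get?_empty] at hkv; cases hkv
  have h1 : PySem.Str.len s - 3 + 1 = PySem.Str.len s - 2 := by ring
  rw [← PySem.Dict.foldl_insert_getD_add_one_eq_counter, ← afold_eq _ _ h0,
    grams, List.foldl_map, pyShingles, h1]

-- the L1 identity: sum of |a-b| over the union = total_a + total_b - 2 * sum of min over the intersection
theorem qgram_key (A B : List String) :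
    ∑ g ∈ (A.toFinset ∪ B.toFinset), |((A.count g : Int)) - (B.count g : Int)|
      = (A.length : Int) + (B.length : Int)
        - 2 * ∑ g ∈ A.toFinset ∩ B.toFinset, min ((A.count g : Int)) ((B.count g : Int)) := by
  have hmin : ∑ g ∈ A.toFinset ∩ B.toFinset, min ((A.count g : Int)) ((B.count g : Int))
      = ∑ g ∈ (A.toFinset ∪ B.toFinset), min ((A.count g : Int)) ((B.count g : Int)) := by
    apply Finset.sum_subset (Finset.inter_subset_union)
    intro g hg hng
    simp only [Finset.mem_inter, Finset.mem_union, List.mem_toFinset] at hg hng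
    rcases hg with h | h
    · have : B.count g = 0 := List.count_eq_zero.mpr (fun hb => hng ⟨h, hb⟩)
      simp [this]
    · have : A.count g = 0 := List.count_eq_zero.mpr (fun ha => hng ⟨ha, h⟩)
      simp [this]
  have hA : ∑ g ∈ (A.toFinset ∪ B.toFinset), ((A.count g : Int)) = (A.length : Int) := by
    rw [← Finset.sum_subset (Finset.subset_union_left (s₂ := B.toFinset))]
    · rw [← Nat.cast_sum]; exact_mod_cast congrArg Nat.cast (List.sum_toFinset_count_eq_length A)
    · intro g _ hng
      simp only [List.mem_toFinset] at hng
      simp [List.count_eq_zero.mpr hng]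
  have hB : ∑ g ∈ (A.toFinset ∪ B.toFinset), ((B.count g : Int)) = (B.length : Int) := by
    rw [← Finset.sum_subset (Finset.subset_union_right (s₁ := A.toFinset))]
    · rw [← Nat.cast_sum]; exact_mod_cast congrArg Nat.cast (List.sum_toFinset_count_eq_length B)
    · intro g _ hng
      simp only [List.mem_toFinset] at hng
      simp [List.count_eq_zero.mpr hng]
  rw [hmin, ← hA, ← hB]
  rw [← Finset.sum_add_distrib, Finset.mul_sum, ← Finset.sum_sub_distrib]
  apply Finset.sum_congr rfl
  intro g _
  rw [min_def]
  split_ifs <;> [rw [abs_of_nonpos (by omega)]; rw [abs_of_nonneg (by omega)]] <;> ring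

theorem union_fold (A B : List String) :
    (PySem.Set.ofList B : List String).foldl (fun u sh => PySem.Set.add u sh)
      ((PySem.Set.ofList A : List String).foldl (fun u sh => PySem.Set.add u sh) PySem.Set.empty)
    = PySem.Set.update (PySem.Set.ofList A) (PySem.Set.ofList B) := by
  have h : (PySem.Set.ofList B : List String).foldl (fun u sh => PySem.Set.add u sh)
      ((PySem.Set.ofList A : List String).foldl (fun u sh => PySem.Set.add u sh) PySem.Set.empty)
    = PySem.Set.update (PySem.Set.ofList (PySem.Set.ofList A)) (PySem.Set.ofList B) := rfl
  rw [h, PySem.Set.ofList_ofList]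

theorem union_toFinset (A B : List String) :
    (PySem.Set.update (PySem.Set.ofList A) (PySem.Set.ofList B) : List String).toFinset
      = A.toFinset ∪ B.toFinset := by
  ext g
  simp [PySem.Set.mem_update, PySem.Set.mem_ofList]

-- A's union loop + abs loop, on counter dicts, is the Finset L1 sum
theorem q_gram_sum_shape (A B : List String) :
    (PySem.Set.update (PySem.Set.ofList A) (PySem.Set.ofList B) : List String).foldl
      (fun dist sh =>
        let ca : Int := match (PySem.Dict.counter A).get? sh with | some v => v | none => 0
        let cb : Int := match (PySem.Dict.counter B).get? sh with | some v => v | none => 0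
        dist + |ca - cb|) 0
    = ∑ g ∈ (A.toFinset ∪ B.toFinset), |((A.count g : Int)) - (B.count g : Int)| := by
  have hfold := PySem.List.foldl_add
    (l := (PySem.Set.update (PySem.Set.ofList A) (PySem.Set.ofList B) : List String))
    (a := 0)
    (g := fun sh => |(match (PySem.Dict.counter A).get? sh with | some v => v | none => 0)
      - (match (PySem.Dict.counter B).get? sh with | some v => v | none => 0)|)
  rw [hfold]
  have hnd : (PySem.Set.update (PySem.Set.ofList A) (PySem.Set.ofList B) : List String).Nodup :=
    PySem.Set.nodup_update _ _ (PySem.Set.nodup_ofList _)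
  rw [zero_add, ← List.sum_toFinset _ hnd, union_toFinset]
  apply Finset.sum_congr rfl
  intro g _
  have hm : ∀ (X : List String),
      (match (PySem.Dict.counter X).get? g with | some v => v | none => 0)
        = ((X.count g : Int)) := by
    intro X
    have := PySem.Dict.getD_counter (xs := X) (v := g)
    rw [PySem.Dict.getD_eq_get?_getD] at this
    cases hg : (PySem.Dict.counter X).get? g <;> rw [hg] at this <;> simpa using this
  rw [hm A, hm B]

theorem ofList_toFinset (A : List String) :
    (PySem.Set.ofList A : List String).toFinset = A.toFinset := by
  ext g; simp [PySem.Set.mem_ofList]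

-- sum of a counter's values = length of the counted list
theorem total_eq (A : List String) :
    (PySem.Dict.counter A).values.sum = (A.length : Int) := by
  have h1 : (PySem.Dict.counter A).values
      = (PySem.Set.ofList A : List String).map (fun k => ((A.count k : Int))) := by
    show ((PySem.Dict.counter A).items).map (·.2) = _
    rw [PySem.Dict.items_counter, List.map_map]
    rfl
  rw [h1, ← List.sum_toFinset _ (PySem.Set.nodup_ofList _), ofList_toFinset]
  rw [← Nat.cast_sum]
  exact_mod_cast congrArg Nat.cast (List.sum_toFinset_count_eq_length A)

-- B's intersection pass is the Finset min-sum over the intersection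
theorem overlap_eq (A B : List String) :
    (((PySem.Dict.counter A).items.filter (fun gv => (PySem.Dict.counter B).contains gv.1)).map
      (fun gv => min gv.2 ((PySem.Dict.counter B).getD gv.1 0))).sum
    = ∑ g ∈ A.toFinset ∩ B.toFinset, min ((A.count g : Int)) ((B.count g : Int)) := by
  rw [PySem.Dict.items_counter, List.filter_map, List.map_map]
  have h2 : ((fun gv : String × Int => min gv.2 ((PySem.Dict.counter B).getD gv.1 0))
      ∘ fun k => (k, (A.count k : Int)))
      = fun k => min ((A.count k : Int)) ((B.count k : Int)) := by
    funext k
    simp [Function.comp, PySem.Dict.getD_counter]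
  have h3 : ((fun gv : String × Int => (PySem.Dict.counter B).contains gv.1)
      ∘ fun k => (k, (A.count k : Int))) = fun k => B.contains k := by
    funext k
    simp [Function.comp, PySem.Dict.contains_counter]
  rw [h2, h3]
  have hnd : ((PySem.Set.ofList A : List String).filter (fun k => B.contains k)).Nodup :=
    (PySem.Set.nodup_ofList _).filter _
  rw [← List.sum_toFinset _ hnd]
  apply Finset.sum_congr
  · ext g
    simp [PySem.Set.mem_ofList]
  · intro g _; rfl

-- A's value as a Finset sum over the union of the two gram supports
theorem q_gram_eq_sum (a b : String) :

    q_gram a b = ∑ g ∈ ((grams a).toFinset ∪ (grams b).toFinset),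
      |(((grams a).count g : Int)) - ((grams b).count g : Int)| := by
  simp only [q_gram]
  rw [pyShingles_eq_counter a, pyShingles_eq_counter b, PySem.Dict.keys_counter,
    PySem.Dict.keys_counter, union_fold]
  exact q_gram_sum_shape (grams a) (grams b)

-- B's value via qgram_key
theorem q_gram_alt_eq (a b : String) :
    q_gram_alt a b = ((grams a).length : Int) + ((grams b).length : Int)
      - 2 * ∑ g ∈ (grams a).toFinset ∩ (grams b).toFinset,
          min (((grams a).count g : Int)) (((grams b).count g : Int)) := by
  simp only [q_gram_alt]
  rw [counts3_eq_counter a, counts3_eq_counter b, total_eq, total_eq, overlap_eq]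

-- ===== VERDICT (by name: the statement is the Claim_ definition above) =====
theorem q_gram_spec : Claim_equal_q_gram := by
  intro a b _
  unfold Spec_q_gram
  rw [q_gram_eq_sum, q_gram_alt_eq, qgram_key]
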